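-- pv_equiv track=rewrite | github.com/bodacom/time-tracker | analyzer.py | make_entities
-- ===== SOURCE A (Python) =====
-- def make_entities(log_dump: list) -> list:
--     '''
--     Makes entities from list containing raw log_dump strings.
--     Returns list with entities of list type.
--
--     ['1665761850.8328192',
--      'main.py - beetroot - Visual Studio Code',
--      'x:1191 y:1051 screen:0 window:115343363', ...]
--
--     becomes
--
--     [['1665761850.8328192', 'main.py - beetroot - Visual Studio Code', 'x:1191 y:1051 screen:0 window:115343363'], ...]
--
--     '''
--     log_entities = []
--     entity = []
--
--     for line in log_dump:
--         # if line_counter == 4: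
--         #     log_entities.append(entity)
--         #     entity = []
--         #     line_counter = 1
--         # else:
--         #     entity.append(line.rstrip())
--         #     line_counter += 1
--         try:
--             float(line)
--             if len(entity) !=0:
--                 log_entities.append(entity)
--                 entity = []
--             entity.append(line.rstrip())
--         except:
--             entity.append(line.rstrip())
--
--     del entity
--
--     return log_entities
-- ===== SOURCE B (Python) =====
-- def _is_marker(line):
--     try:
--         float(line)
--         return True
--     except:
--         return False
--
-- def make_entities(log_dump: list) -> list:
--     '''Chunk decomposition: repeatedly take a chunk = one line plus the run of
--     following non-float lines, then drop the trailing (unterminated) chunk.'''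
--     chunks = []
--     i = 0
--     n = len(log_dump)
--     while i < n:
--         j = i + 1
--         while j < n and not _is_marker(log_dump[j]):
--             j += 1
--         chunks.append([log_dump[k].rstrip() for k in range(i, j)])
--         i = j
--     return chunks[:-1]
-- ===== Notes on version B (the rewrite author's own statement) =====
-- stated objective: alternative
-- what changed: Replaces A's accumulate-and-flush fold (building an entity and flushing it at each float marker, never emitting the last one) with a chunking decomposition: repeatedly take one line plus the following run of non-float lines as a chunk, then drop the trailing unterminated chunk.
import Mathlib
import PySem

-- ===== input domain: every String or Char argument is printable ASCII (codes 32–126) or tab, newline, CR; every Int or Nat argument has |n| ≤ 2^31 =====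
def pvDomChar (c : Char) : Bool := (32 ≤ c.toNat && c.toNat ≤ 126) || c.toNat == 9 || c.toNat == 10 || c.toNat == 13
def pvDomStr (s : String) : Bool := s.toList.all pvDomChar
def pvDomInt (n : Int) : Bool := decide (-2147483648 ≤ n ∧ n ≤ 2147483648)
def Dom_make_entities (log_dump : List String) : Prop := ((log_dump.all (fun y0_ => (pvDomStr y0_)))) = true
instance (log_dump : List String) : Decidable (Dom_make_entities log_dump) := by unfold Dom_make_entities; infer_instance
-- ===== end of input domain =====

-- B changes the decomposition: chunk-by-chunk splitting at float markers instead of A's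
-- accumulate-and-flush loop; same O(n) cost (objective: alternative).

-- ===== PORT A =====
-- Hand port of `float(line)` success (no PySem primitive for float parsing); exact on the
-- printable-ASCII domain: optional whitespace, sign, then inf/infinity/nan (any case) or a
-- decimal literal with optional '.', exponent and single '_' between digits.
def pvAsciiDigit (c : Char) : Bool := '0' ≤ c && c ≤ '9'

-- consume (digit | '_' digit)* and return the remainder
def pvDigRest : List Char → List Char
  | [] => []
  | c :: cs =>
    if pvAsciiDigit c then pvDigRest cs
    else if c = '_' then
      match cs with
      | d :: cs' => if pvAsciiDigit d then pvDigRest cs' else c :: cs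
      | [] => [c]
    else c :: cs

-- a digitpart: digit (digit | '_' digit)*; some rest iff present
def pvDigitpart? : List Char → Option (List Char)
  | c :: cs => if pvAsciiDigit c then some (pvDigRest cs) else none
  | [] => none

def pvMantissa? (cs : List Char) : Option (List Char) :=
  match pvDigitpart? cs with
  | some r =>
    match r with
    | '.' :: r2 =>
      match pvDigitpart? r2 with
      | some r3 => some r3
      | none => some r2
    | _ => some r
  | none =>
    match cs with
    | '.' :: r2 => pvDigitpart? r2
    | _ => none

def pvExpOk (r : List Char) : Bool :=
  match r with
  | [] => true
  | e :: r2 =>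
    if e = 'e' ∨ e = 'E' then
      let r3 := match r2 with
        | s :: r2' => if s = '+' ∨ s = '-' then r2' else r2
        | [] => r2
      match pvDigitpart? r3 with
      | some [] => true
      | _ => false
    else false

def pvFloatSpace (c : Char) : Bool :=
  c = ' ' || c = '\t' || c = '\n' || c = '\r' || c.toNat == 11 || c.toNat == 12

-- float(s) succeeds?
def pvIsFloat (s : String) : Bool :=
  let cs := ((s.toList.dropWhile pvFloatSpace).reverse.dropWhile pvFloatSpace).reverse
  let cs1 := match cs with
    | c :: r => if c = '+' ∨ c = '-' then r else cs
    | [] => []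
  let ls := cs1.map PySem.Chars.lowerChar
  if ls = ['i','n','f'] ∨ ls = ['i','n','f','i','n','i','t','y'] ∨ ls = ['n','a','n'] then true
  else
    match pvMantissa? cs1 with
    | some r => pvExpOk r
    | none => false

-- A: fold over the lines with state (log_entities, entity); the final entity is discarded.
def pvStepA (st : List (List String) × List String) (line : String) :
    List (List String) × List String :=
  let log_entities := st.1
  let entity := st.2
  if pvIsFloat line then
    if entity.length ≠ 0 then
      (log_entities ++ [entity], [] ++ [PySem.Str.rstrip line])
    else
      (log_entities, entity ++ [PySem.Str.rstrip line])
  else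
    (log_entities, entity ++ [PySem.Str.rstrip line])

def make_entities (log_dump : List String) : List (List String) :=
  (log_dump.foldl pvStepA ([], [])).1

-- ===== PORT B =====
-- B-side hand port of `float(line)` success: instead of A's recursive-descent parser the
-- numeric grammar is recognised by a finite state machine folded over the characters
-- (states: 0 start, 2 int digits, 4 after '_' in int, 3 after leading '.', 5 after '.',
-- 6 fraction digits, 12 after '_' in fraction, 7 after e/E, 8 after exponent sign,
-- 9 exponent digits, 13 after '_' in exponent, 99 dead); exact on the same domain.
def pvFSM (q : Nat) (c : Char) : Nat :=
  match q with
  | 0 => if c.isDigit then 2 else if c = '.' then 3 else 99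
  | 2 => if c.isDigit then 2 else if c = '_' then 4 else if c = '.' then 5
         else if c = 'e' ∨ c = 'E' then 7 else 99
  | 4 => if c.isDigit then 2 else 99
  | 3 => if c.isDigit then 6 else 99
  | 5 => if c.isDigit then 6 else if c = 'e' ∨ c = 'E' then 7 else 99
  | 6 => if c.isDigit then 6 else if c = '_' then 12
         else if c = 'e' ∨ c = 'E' then 7 else 99
  | 12 => if c.isDigit then 6 else 99
  | 7 => if c.isDigit then 9 else if c = '+' ∨ c = '-' then 8 else 99
  | 8 => if c.isDigit then 9 else 99
  | 9 => if c.isDigit then 9 else if c = '_' then 13 else 99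
  | 13 => if c.isDigit then 9 else 99
  | _ => 99

def pvAcc (q : Nat) : Bool := q == 2 || q == 5 || q == 6 || q == 9

def pvIsFloat2 (s : String) : Bool :=
  let cs := ((s.toList.dropWhile pvFloatSpace).reverse.dropWhile pvFloatSpace).reverse
  let cs1 := match cs with
    | c :: r => if c = '+' ∨ c = '-' then r else cs
    | [] => []
  let ls := cs1.map PySem.Chars.lowerChar
  if ls = ['i','n','f'] ∨ ls = ['i','n','f','i','n','i','t','y'] ∨ ls = ['n','a','n'] then true
  else pvAcc (cs1.foldl pvFSM 0)

-- B: the outer while-loop takes one chunk at a time: head line plus the run of following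
-- non-float lines (the inner scan), rstrip-ing each; then chunks[:-1].
def pvChunks : List String → List (List String)
  | [] => []
  | head :: rest =>
    (PySem.Str.rstrip head :: (rest.takeWhile (fun x => !pvIsFloat2 x)).map PySem.Str.rstrip)
      :: pvChunks (rest.dropWhile (fun x => !pvIsFloat2 x))
  termination_by ls => ls.length
  decreasing_by
    simpa using Nat.lt_succ_of_le (List.length_dropWhile_le (fun x => !pvIsFloat2 x) rest)

def make_entities_alt (log_dump : List String) : List (List String) :=
  (pvChunks log_dump).dropLast

-- ===== PRECONDITION & SPEC =====
def Spec_make_entities (log_dump : List String) (out : List (List String)) : Prop := out = make_entities_alt log_dump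
instance (log_dump : List String) (out : List (List String)) : Decidable (Spec_make_entities log_dump out) := by unfold Spec_make_entities; infer_instance

-- ===== CLAIM (what is proved, stated in full; the proofs are below) =====
def Claim_equal_make_entities : Prop := ∀ (log_dump : List String), Dom_make_entities log_dump → Spec_make_entities log_dump (make_entities log_dump)

-- ===== LEMMAS AND PROOFS =====

-- `pvAsciiDigit` is definitionally `Char.isDigit`
theorem pvNotDig {c : Char} (h : ¬ pvAsciiDigit c = true) : c.isDigit = false := by
  have he : pvAsciiDigit c = c.isDigit := rfl
  rw [he] at h; simpa using h

theorem pvDig {c : Char} (h : pvAsciiDigit c = true) : c.isDigit = true := h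

-- the dead state absorbs
theorem pvFSM_dead (cs : List Char) : cs.foldl pvFSM 99 = 99 := by
  induction cs with
  | nil => rfl
  | cons c cs ih => simpa [pvFSM] using ih

-- "not followable": what `pvDigRest` leaves behind never starts with a digit, and an
-- initial '_' is never followed by a digit
def pvNF : List Char → Prop
  | [] => True
  | c :: r => c.isDigit = false ∧ (c = '_' → match r with | [] => True | d :: _ => d.isDigit = false)

theorem pvDigRest_NF (cs : List Char) : pvNF (pvDigRest cs) := by
  fun_induction pvDigRest cs with
  | case1 => trivial
  | case2 => assumption
  | case3 => assumption
  | case4 a b hd h2 => exact ⟨by decide, fun _ => pvNotDig hd⟩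
  | case5 h => exact ⟨by decide, fun _ => trivial⟩
  | case6 c cs h h2 => exact ⟨pvNotDig h, fun hc => absurd hc (by simpa using h2)⟩

-- the digit-run states 2/6/9 are invariant under consuming a (digit | '_' digit)* run
theorem pvFSM_runDR (q : Nat) (hq : q = 2 ∨ q = 6 ∨ q = 9) (cs : List Char) :
    cs.foldl pvFSM q = (pvDigRest cs).foldl pvFSM q := by
  fun_induction pvDigRest cs with
  | case1 => rfl
  | case2 c cs h ih =>
      have hd := pvDig h
      have hstep : pvFSM q c = q := by rcases hq with rfl | rfl | rfl <;> simp [pvFSM, hd]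
      simpa [hstep] using ih
  | case3 a b hd hnd ih =>
      have hda := pvDig hd
      rcases hq with rfl | rfl | rfl <;> simpa [pvFSM, hda] using ih
  | case4 a b hd h2 => rfl
  | case5 h => rfl
  | case6 c cs h h2 => rfl

-- exponent-digit state: accepts iff the rest is exactly a digit run
theorem pvAsciiDigit_eq (c : Char) : pvAsciiDigit c = c.isDigit := rfl

theorem pvFSM_S9 (r : List Char) (h : pvNF r) :
    pvAcc (r.foldl pvFSM 9) = decide (r = []) := by
  match r, h with
  | [], _ => rfl
  | c :: r', ⟨hnd, hu⟩ =>
    by_cases hc : c = '_'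
    · subst hc
      cases r' with
      | nil => decide
      | cons d r'' =>
        have hd : d.isDigit = false := hu rfl
        simp [pvFSM, hd, pvFSM_dead, pvAcc]
    · simp [pvFSM, hnd, hc, pvFSM_dead, pvAcc]

-- after 'e'/'E': the machine from state 7 recognises exactly what `pvExpOk` accepts
theorem pvFSM_E (c : Char) (r : List Char) (hc : c = 'e' ∨ c = 'E') :
    pvAcc (r.foldl pvFSM 7) = pvExpOk (c :: r) := by
  have hE : pvExpOk (c :: r) =
      (let r3 := match r with | s :: r2' => if s = '+' ∨ s = '-' then r2' else r | [] => r
       match pvDigitpart? r3 with | some [] => true | _ => false) := by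
    rcases hc with rfl | rfl <;> simp [pvExpOk]
  rw [hE]
  cases r with
  | nil => rfl
  | cons s r' =>
    by_cases hs : s = '+' ∨ s = '-'
    · have hnd : s.isDigit = false := by rcases hs with rfl | rfl <;> decide
      cases r' with
      | nil => simp [pvFSM, hnd, hs, pvDigitpart?, pvAcc]
      | cons d r'' =>
        by_cases hd : d.isDigit = true
        · have h9 := pvFSM_runDR 9 (Or.inr (Or.inr rfl)) r''
          have hS9 := pvFSM_S9 (pvDigRest r'') (pvDigRest_NF r'')
          simp only [List.foldl_cons]
          rw [show pvFSM 7 s = 8 by simp [pvFSM, hnd, hs],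
            show pvFSM 8 d = 9 by simp [pvFSM, hd], h9, hS9]
          simp [hs, pvDigitpart?, pvAsciiDigit_eq, hd]
          cases pvDigRest r'' <;> simp
        · simp only [Bool.not_eq_true] at hd
          simp [pvFSM, hnd, hs, hd, pvFSM_dead, pvDigitpart?, pvAsciiDigit_eq, pvAcc]
    · by_cases hd : s.isDigit = true
      · have h9 := pvFSM_runDR 9 (Or.inr (Or.inr rfl)) r'
        have hS9 := pvFSM_S9 (pvDigRest r') (pvDigRest_NF r')
        simp only [List.foldl_cons]
        rw [show pvFSM 7 s = 9 by simp [pvFSM, hd], h9, hS9]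
        simp [hs, pvDigitpart?, pvAsciiDigit_eq, hd]
        cases pvDigRest r' <;> simp
      · simp only [Bool.not_eq_true] at hd
        simp [pvFSM, hs, hd, pvFSM_dead, pvDigitpart?, pvAsciiDigit_eq, pvAcc]

-- fraction-digit state on a not-followable rest
theorem pvFSM_S6 (r : List Char) (h : pvNF r) :
    pvAcc (r.foldl pvFSM 6) = pvExpOk r := by
  match r, h with
  | [], _ => rfl
  | c :: r', ⟨hnd, hu⟩ =>
    by_cases he : c = 'e' ∨ c = 'E'
    · rcases he with rfl | rfl
      · simpa [pvFSM] using pvFSM_E 'e' r' (Or.inl rfl)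
      · simpa [pvFSM] using pvFSM_E 'E' r' (Or.inr rfl)
    · by_cases hc : c = '_'
      · subst hc
        cases r' with
        | nil => decide
        | cons d r'' =>
          have hd : d.isDigit = false := hu rfl
          simp [pvFSM, pvExpOk, hd, pvFSM_dead, pvAcc]
      · simp [pvFSM, pvExpOk, hnd, hc, he, pvFSM_dead, pvAcc]

-- state after the decimal point following digits
theorem pvFSM_S5 (r2 : List Char) :
    pvAcc (r2.foldl pvFSM 5) =
      pvExpOk (match pvDigitpart? r2 with | some r3 => r3 | none => r2) := by
  cases r2 with
  | nil => rfl
  | cons d r' =>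
    by_cases hd : d.isDigit = true
    · have h6 := pvFSM_runDR 6 (Or.inr (Or.inl rfl)) r'
      have hS6 := pvFSM_S6 (pvDigRest r') (pvDigRest_NF r')
      simp only [List.foldl_cons]
      rw [show pvFSM 5 d = 6 by simp [pvFSM, hd], h6, hS6]
      simp [pvDigitpart?, pvAsciiDigit_eq, hd]
    · simp only [Bool.not_eq_true] at hd
      by_cases he : d = 'e' ∨ d = 'E'
      · have hE := pvFSM_E d r' he
        simp only [List.foldl_cons]
        rw [show pvFSM 5 d = 7 by simp [pvFSM, hd, he], hE]
        simp [pvDigitpart?, pvAsciiDigit_eq, hd]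
      · simp [pvFSM, hd, he, pvFSM_dead, pvDigitpart?, pvAsciiDigit_eq, pvAcc, pvExpOk]

-- integer-digit state on a not-followable rest
-- what remains admissible after the integer digit run, as A's `pvMantissa?` computes it
def pvAfterInt (r : List Char) : List Char :=
  match r with
  | '.' :: r2 => (match pvDigitpart? r2 with | some r3 => r3 | none => r2)
  | _ => r

theorem pvFSM_S2 (r : List Char) (h : pvNF r) :
    pvAcc (r.foldl pvFSM 2) = pvExpOk (pvAfterInt r) := by
  match r, h with
  | [], _ => rfl
  | c :: r', ⟨hnd, hu⟩ =>
    by_cases hdot : c = '.'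
    · subst hdot
      simpa [pvFSM, pvAfterInt] using pvFSM_S5 r'
    · by_cases he : c = 'e' ∨ c = 'E'
      · have hE := pvFSM_E c r' he
        have h7 : pvFSM 2 c = 7 := by
          rcases he with rfl | rfl <;> simp [pvFSM]
        rcases he with rfl | rfl <;> simpa [h7, pvAfterInt] using hE
      · by_cases hc : c = '_'
        · subst hc
          cases r' with
          | nil => decide
          | cons d r'' =>
            have hd : d.isDigit = false := hu rfl
            simp [pvFSM, pvExpOk, pvAfterInt, hd, pvFSM_dead, pvAcc]
        · have ha : pvAfterInt (c :: r') = c :: r' := by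
            cases c; simp_all [pvAfterInt]
          simp [pvFSM, pvExpOk, hnd, hc, he, hdot, pvFSM_dead, pvAcc, ha]

-- the state machine equals A's recursive-descent numeric check
theorem pvFSM_main (u : List Char) :
    pvAcc (u.foldl pvFSM 0) =
      (match pvMantissa? u with | some r => pvExpOk r | none => false) := by
  cases u with
  | nil => rfl
  | cons c cs =>
    by_cases hd : c.isDigit = true
    · have h2 := pvFSM_runDR 2 (Or.inl rfl) cs
      have hS2 := pvFSM_S2 (pvDigRest cs) (pvDigRest_NF cs)
      simp only [List.foldl_cons]
      rw [show pvFSM 0 c = 2 by simp [pvFSM, hd], h2, hS2]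
      rcases hr : pvDigRest cs with _ | ⟨c', r'⟩
      · simp [pvMantissa?, pvDigitpart?, pvAsciiDigit_eq, hd, hr, pvExpOk, pvAfterInt]
      · by_cases hc' : c' = '.'
        · subst hc'
          have hm : pvMantissa? (c :: cs) =
              (match pvDigitpart? r' with | some r3 => some r3 | none => some r') := by
            simp only [pvMantissa?]
            rw [show pvDigitpart? (c :: cs) = some (pvDigRest cs) from by
              simp [pvDigitpart?, pvAsciiDigit_eq, hd], hr]
            simp
          rw [hm]
          cases hdp : pvDigitpart? r' with
          | none => simp [pvAfterInt, hdp]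
          | some r3 => simp [pvAfterInt, hdp]
        · have hm : pvMantissa? (c :: cs) = some (c' :: r') := by
            simp only [pvMantissa?, pvDigitpart?]
            rw [if_pos (by simpa [pvAsciiDigit_eq] using hd), hr]
            cases c'; simp_all
          have ha : pvAfterInt (c' :: r') = c' :: r' := by
            cases c'; simp_all [pvAfterInt]
          rw [hm, ha]
    · simp only [Bool.not_eq_true] at hd
      by_cases hdot : c = '.'
      · subst hdot
        cases cs with
        | nil => rfl
        | cons d cs' =>
          by_cases hd2 : d.isDigit = true
          · have h6 := pvFSM_runDR 6 (Or.inr (Or.inl rfl)) cs'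
            have hS6 := pvFSM_S6 (pvDigRest cs') (pvDigRest_NF cs')
            simp only [List.foldl_cons]
            rw [show pvFSM 0 '.' = 3 by decide, show pvFSM 3 d = 6 by simp [pvFSM, hd2],
              h6, hS6]
            simp [pvMantissa?, pvDigitpart?, pvAsciiDigit_eq, hd2]
          · simp only [Bool.not_eq_true] at hd2
            simp [pvFSM, hd2, pvFSM_dead, pvMantissa?, pvDigitpart?, pvAsciiDigit_eq, pvAcc]
      · have hm : pvMantissa? (c :: cs) = none := by
          simp only [pvMantissa?, pvDigitpart?]
          rw [if_neg (by simp [pvAsciiDigit_eq, hd])]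
          cases c; simp_all
        simp [pvFSM, hd, hdot, pvFSM_dead, pvAcc, hm]

-- hence the two float recognisers agree
theorem pvIsFloat2_eq (s : String) : pvIsFloat2 s = pvIsFloat s := by
  simp only [pvIsFloat2, pvIsFloat]
  split_ifs with h
  · rfl
  · exact pvFSM_main _

theorem pvPredEq : (fun x => !pvIsFloat2 x) = (fun x => !pvIsFloat x) :=
  funext fun x => by rw [pvIsFloat2_eq]

-- Midpoint: the chunk list produced when `ent` is the currently open chunk.
def pvCC : List String → List String → List (List String)
  | ent, [] => [ent]
  | ent, l :: ls =>
    if pvIsFloat l then ent :: pvCC [PySem.Str.rstrip l] ls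
    else pvCC (ent ++ [PySem.Str.rstrip l]) ls

theorem pvCC_ne_nil (ls : List String) (ent : List String) : pvCC ent ls ≠ [] := by
  induction ls generalizing ent with
  | nil => simp [pvCC]
  | cons l ls ih => simp only [pvCC]; split_ifs <;> simp [ih]

theorem pvCC_span (ls : List String) (ent : List String) :
    pvCC ent ls =
      (ent ++ (ls.takeWhile (fun x => !pvIsFloat x)).map PySem.Str.rstrip)
        :: (match ls.dropWhile (fun x => !pvIsFloat x) with
            | [] => []
            | l' :: ls' => pvCC [PySem.Str.rstrip l'] ls') := by
  induction ls generalizing ent with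
  | nil => simp [pvCC]
  | cons l ls ih =>
    by_cases h : pvIsFloat l
    · simp [pvCC, h]
    · rw [List.takeWhile_cons_of_pos (by simp [h]),
        List.dropWhile_cons_of_pos (by simp [h])]
      have hu : pvCC ent (l :: ls) = pvCC (ent ++ [PySem.Str.rstrip l]) ls := by
        simp [pvCC, h]
      rw [hu, ih]
      simp

theorem pvChunks_eq_pvCC (ls : List String) (x : String) :
    pvChunks (x :: ls) = pvCC [PySem.Str.rstrip x] ls := by
  induction hn : ls.length using Nat.strong_induction_on generalizing x ls with
  | _ n ih =>
    rw [pvChunks, pvPredEq, pvCC_span]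
    refine congrArg₂ _ rfl ?_
    cases hd : ls.dropWhile (fun x => !pvIsFloat x) with
    | nil => rw [pvChunks]
    | cons l' ls' =>
      subst hn
      refine ih ls'.length ?_ ls' l' rfl
      have := List.length_dropWhile_le (fun x => !pvIsFloat x) ls
      rw [hd] at this
      simp at this
      omega

theorem foldA_char (ls : List String) (acc : List (List String)) (ent : List String)
    (h : ent ≠ []) :
    (ls.foldl pvStepA (acc, ent)).1 = acc ++ (pvCC ent ls).dropLast := by
  induction ls generalizing acc ent with
  | nil => simp [pvCC]
  | cons l ls ih =>
    rw [List.foldl_cons]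
    by_cases hf : pvIsFloat l
    · have hlen : ent.length ≠ 0 := by simpa [List.length_eq_zero_iff] using h
      have hstep : pvStepA (acc, ent) l = (acc ++ [ent], [PySem.Str.rstrip l]) := by
        simp [pvStepA, hf, hlen]
      rw [hstep, ih _ [PySem.Str.rstrip l] (by simp)]
      simp only [pvCC, hf, if_true]
      rw [List.dropLast_cons_of_ne_nil (pvCC_ne_nil ls [PySem.Str.rstrip l])]
      simp
    · have hstep : pvStepA (acc, ent) l = (acc, ent ++ [PySem.Str.rstrip l]) := by
        simp [pvStepA, hf]
      rw [hstep, ih _ (ent ++ [PySem.Str.rstrip l]) (by simp)]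
      simp [pvCC, hf]

-- ===== VERDICT (by name: the statement is the Claim_ definition above) =====
theorem make_entities_spec : Claim_equal_make_entities := by
  intro log_dump _
  show make_entities log_dump = make_entities_alt log_dump
  cases log_dump with
  | nil => simp [make_entities, make_entities_alt, pvChunks]
  | cons x ls =>
    unfold make_entities make_entities_alt
    rw [pvChunks_eq_pvCC, List.foldl_cons]
    have hfirst : pvStepA ([], []) x = ([], [PySem.Str.rstrip x]) := by
      by_cases hf : pvIsFloat x <;> simp [pvStepA, hf]
    rw [hfirst]
    exact foldA_char ls [] [PySem.Str.rstrip x] (by simp)
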